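-- pv_equiv track=rewrite | github.com/omentic/ilo | wrapper/prolog.py | codelist
-- ===== SOURCE A (Python) =====
-- def codelist(sentence: str) -> list[chr]:
--     sentence = sentence \
--         .replace("!", " ! ") \
--         .replace(",", " , ") \
--         .replace(".", " . ") \
--         .replace(":", " : ") \
--         .replace(";", " ; ") \
--         .replace("?", " ? ")
--     return [ord(char) for char in sentence]
-- ===== SOURCE B (Python) =====
-- PUNCT = {'!', ',', '.', ':', ';', '?'}
--
-- def codelist(sentence: str) -> list:
--     out = []
--     for ch in sentence:
--         if ch in PUNCT:
--             out.extend((32, ord(ch), 32))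
--         else:
--             out.append(ord(ch))
--     return out
-- ===== Notes on version B (the rewrite author's own statement) =====
-- stated objective: alternative
-- what changed: B replaces the six full-string .replace passes plus a final ord pass with one fused traversal that emits 32, ord(ch), 32 for the six punctuation marks and ord(ch) otherwise.
import Mathlib
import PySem

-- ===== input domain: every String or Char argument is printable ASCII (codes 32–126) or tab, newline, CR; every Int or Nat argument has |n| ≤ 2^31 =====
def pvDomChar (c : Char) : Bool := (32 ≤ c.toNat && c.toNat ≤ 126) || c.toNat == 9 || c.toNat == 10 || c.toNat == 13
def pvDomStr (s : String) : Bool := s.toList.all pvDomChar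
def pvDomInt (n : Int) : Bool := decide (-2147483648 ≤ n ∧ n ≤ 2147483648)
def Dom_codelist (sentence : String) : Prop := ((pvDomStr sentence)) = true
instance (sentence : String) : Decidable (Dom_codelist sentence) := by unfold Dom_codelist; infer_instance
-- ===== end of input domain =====

-- B fuses A's six full-string replace passes and the ord pass into one fused traversal emitting char codes directly (objective: alternative; same cost).

-- ===== PORT A =====
def codelist (sentence : String) : List Int :=
  let s1 := PySem.Str.replace sentence "!" " ! "
  let s2 := PySem.Str.replace s1 "," " , "
  let s3 := PySem.Str.replace s2 "." " . "
  let s4 := PySem.Str.replace s3 ":" " : "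
  let s5 := PySem.Str.replace s4 ";" " ; "
  let s6 := PySem.Str.replace s5 "?" " ? "
  s6.toList.map (fun c => (c.toNat : Int))

-- ===== PORT B =====
-- the set constant PUNCT from Source B
def pvPunct : PySem.Set Char := PySem.Set.ofList ['!', ',', '.', ':', ';', '?']

-- the for-loop of Source B, building `out` front to back
def codelistGo : List Char → List Int
  | [] => []
  | c :: rest =>
      if PySem.Set.contains pvPunct c then 32 :: (c.toNat : Int) :: 32 :: codelistGo rest
      else (c.toNat : Int) :: codelistGo rest

def codelist_alt (sentence : String) : List Int := codelistGo sentence.toList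

-- ===== PRECONDITION & SPEC =====
def Spec_codelist (sentence : String) (out : List Int) : Prop := out = codelist_alt sentence
instance (sentence : String) (out : List Int) : Decidable (Spec_codelist sentence out) := by unfold Spec_codelist; infer_instance

-- ===== CLAIM (what is proved, stated in full; the proofs are below) =====
def Claim_equal_codelist : Prop := ∀ (sentence : String), Dom_codelist sentence → Spec_codelist sentence (codelist sentence)

-- ===== LEMMAS AND PROOFS =====

-- replace.go with a single-character pattern, enough fuel: per-character expansion
lemma replace_go_single (c : Char) (ns : List Char) :
    ∀ (l : List Char) (fuel : Nat) (acc : List Char), l.length ≤ fuel →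
      PySem.Chars.replace.go [c] ns fuel l acc
        = acc.reverse ++ l.flatMap (fun x => if x = c then ns else [x]) := by
  intro l
  induction l with
  | nil =>
      intro fuel acc _
      cases fuel <;> simp [PySem.Chars.replace.go]
  | cons x t ih =>
      intro fuel acc hf
      cases fuel with
      | zero => simp at hf
      | succ n =>
          simp only [PySem.Chars.replace.go]
          by_cases hx : x = c
          · subst hx
            simp only [List.isPrefixOf, BEq.rfl, if_pos, Bool.and_self]
            rw [show List.drop [x].length (x :: t) = t from rfl]
            rw [ih n (ns.reverse ++ acc) (by simpa using hf)]
            simp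
          · have : [c].isPrefixOf (x :: t) = false := by
              simp [List.isPrefixOf, Ne.symm hx]
            rw [this]
            simp only [Bool.false_eq_true, if_false]
            rw [ih n (x :: acc) (by simpa using hf)]
            simp [hx]

-- Chars.replace with a single-character pattern is a flatMap
lemma replace_single (s : List Char) (c : Char) (ns : List Char) :
    PySem.Chars.replace s [c] ns = s.flatMap (fun x => if x = c then ns else [x]) := by
  simp only [PySem.Chars.replace, List.isEmpty_cons, Bool.false_eq_true, if_false]
  simpa using replace_go_single c ns s s.length [] le_rfl

-- the per-character expansion the whole replace chain amounts to
def pvExpand (x : Char) : List Char :=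
  if x = '!' ∨ x = ',' ∨ x = '.' ∨ x = ':' ∨ x = ';' ∨ x = '?' then [' ', x, ' '] else [x]

lemma chain_eq_flatMap (s : List Char) :
    ((((((s.flatMap (fun x => if x = '!' then [' ', '!', ' '] else [x])).flatMap
        (fun x => if x = ',' then [' ', ',', ' '] else [x])).flatMap
        (fun x => if x = '.' then [' ', '.', ' '] else [x])).flatMap
        (fun x => if x = ':' then [' ', ':', ' '] else [x])).flatMap
        (fun x => if x = ';' then [' ', ';', ' '] else [x])).flatMap
        (fun x => if x = '?' then [' ', '?', ' '] else [x]))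
      = s.flatMap pvExpand := by
  induction s with
  | nil => simp
  | cons x t ih =>
      simp only [List.flatMap_cons] at *
      rw [List.flatMap_append, List.flatMap_append, List.flatMap_append, List.flatMap_append,
        List.flatMap_append]
      rw [ih]
      congr 1
      by_cases h1 : x = '!'; · subst h1; decide
      by_cases h2 : x = ','; · subst h2; decide
      by_cases h3 : x = '.'; · subst h3; decide
      by_cases h4 : x = ':'; · subst h4; decide
      by_cases h5 : x = ';'; · subst h5; decide
      by_cases h6 : x = '?'; · subst h6; decide
      simp [pvExpand, h1, h2, h3, h4, h5, h6]

lemma codelistGo_eq (s : List Char) :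
    codelistGo s = (s.flatMap pvExpand).map (fun c => (c.toNat : Int)) := by
  induction s with
  | nil => simp [codelistGo]
  | cons x t ih =>
      simp only [codelistGo, List.flatMap_cons, List.map_append, pvExpand]
      have hm : PySem.Set.contains pvPunct x = true ↔ (x = '!' ∨ x = ',' ∨ x = '.' ∨ x = ':' ∨ x = ';' ∨ x = '?') := by
        simp [pvPunct]
      by_cases h : x = '!' ∨ x = ',' ∨ x = '.' ∨ x = ':' ∨ x = ';' ∨ x = '?'
      · rw [if_pos (hm.mpr h), if_pos h, ih]; rfl
      · rw [if_neg (fun hb => h (hm.mp hb)), if_neg h, ih]; rfl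

-- ===== VERDICT (by name: the statement is the Claim_ definition above) =====
theorem codelist_spec : Claim_equal_codelist := by
  intro sentence _
  show codelist sentence = codelist_alt sentence
  simp only [codelist, codelist_alt, PySem.Str.replace, String.toList_ofList]
  rw [show "!".toList = ['!'] from rfl, show ",".toList = [','] from rfl,
      show ".".toList = ['.'] from rfl, show ":".toList = [':'] from rfl,
      show ";".toList = [';'] from rfl, show "?".toList = ['?'] from rfl,
      show " ! ".toList = [' ','!',' '] from rfl, show " , ".toList = [' ',',',' '] from rfl,
      show " . ".toList = [' ','.',' '] from rfl, show " : ".toList = [' ',':',' '] from rfl,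
      show " ; ".toList = [' ',';',' '] from rfl, show " ? ".toList = [' ','?',' '] from rfl]
  rw [replace_single, replace_single, replace_single, replace_single, replace_single,
    replace_single]
  rw [codelistGo_eq, chain_eq_flatMap]
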